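-- pv_equiv track=rewrite | github.com/geomeza/graph | analysis/railroad_travel_time.py | traversal_time_without_tree
-- ===== SOURCE A (Python) =====
-- def traversal_time_without_tree(edges, starting_town):
--     travels_q = [starting_town]
--     result = []
--     while len(travels_q) > 0:
--         traveled = []
--         for i in range(len(travels_q)):
--             for edge in edges:
--                 if edge[0] == travels_q[i] and edge[1] not in result:
--                     travels_q.append(edge[1])
--                 if edge[1] == travels_q[i] and edge[0] not in result:
--                     travels_q.append(edge[0])
--             traveled.append(travels_q[i])
--         for t in traveled:
--             travels_q.remove(t)
--             result.append(t)
--     return result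
-- ===== SOURCE B (Python) =====
-- def traversal_time_without_tree(edges, starting_town):
--     adj = {}
--     for a, b in edges:
--         adj.setdefault(a, []).append(b)
--         adj.setdefault(b, []).append(a)
--     result = []
--     seen = set()
--     level = [starting_town]
--     while level:
--         nxt = [v for u in level for v in adj.get(u, ()) if v not in seen]
--         result.extend(level)
--         seen.update(level)
--         level = nxt
--     return result
-- ===== Notes on version B (the rewrite author's own statement) =====
-- stated objective: faster
-- what changed: Replaced A's rescan of the whole edge list for every queued town and its list-membership tests and O(n) queue removals by a one-pass adjacency dictionary, a seen-set for membership, and a purely functional level-by-level frontier (no in-place queue mutation), preserving edge order and hence A's exact output.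
import Mathlib
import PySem

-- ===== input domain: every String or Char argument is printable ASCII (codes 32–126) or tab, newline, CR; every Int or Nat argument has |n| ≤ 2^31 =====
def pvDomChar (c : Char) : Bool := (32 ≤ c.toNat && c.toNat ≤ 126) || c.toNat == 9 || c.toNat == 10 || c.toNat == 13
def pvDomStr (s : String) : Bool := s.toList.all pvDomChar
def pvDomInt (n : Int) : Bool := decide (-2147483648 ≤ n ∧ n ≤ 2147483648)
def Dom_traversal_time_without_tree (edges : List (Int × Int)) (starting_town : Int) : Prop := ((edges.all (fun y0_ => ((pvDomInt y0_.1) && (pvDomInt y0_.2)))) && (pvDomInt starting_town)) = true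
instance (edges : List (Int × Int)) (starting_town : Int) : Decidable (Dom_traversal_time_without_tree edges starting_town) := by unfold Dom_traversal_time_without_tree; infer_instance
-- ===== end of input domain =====

-- B replaces A's per-town rescans of the edge list, list membership tests and in-place queue
-- surgery by a one-pass adjacency dictionary, a seen-set and functional level-by-level frontiers
-- (objective: faster; same return value, A mutates no argument).


-- ===== PORT A =====
-- inner 'for edge in edges' loop of A, for x = travels_q[i] (appends to travels_q)
def pvAEdgeLoop (edges : List (Int × Int)) (result : List Int) (x : Int) (q : List Int) : List Int :=
  edges.foldl (fun q e =>
    let q := if e.1 == x && !(result.contains e.2) then q ++ [e.2] else q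
    if e.2 == x && !(result.contains e.1) then q ++ [e.1] else q) q

-- 'for i in range(len(travels_q))': state = (travels_q, traveled); travels_q[i] is exact
-- (0 ≤ i < len, and the loop only appends, so pyGetD's default is never used)
def pvAForI (edges : List (Int × Int)) (result : List Int) (n : Nat) (q : List Int) : List Int × List Int :=
  (PySem.List.pyRange 0 (n : Int) 1).foldl (fun st i =>
    (pvAEdgeLoop edges result (PySem.List.pyGetD st.1 i 0) st.1,
     st.2 ++ [PySem.List.pyGetD st.1 i 0])) (q, [])

-- 'for t in traveled: travels_q.remove(t); result.append(t)'; remove? never returns none here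
def pvARemove (traveled : List Int) (q result : List Int) : List Int × List Int :=
  traveled.foldl (fun st t => ((PySem.List.remove? st.1 t).getD st.1, st.2 ++ [t])) (q, result)

-- the while loop; fuel is only a totality guard: 4*|edges|+8 exceeds the number of iterations
-- (each iteration either visits a new town of the ≤ 2*|edges|+1 distinct ones or is followed by one that does)
def pvALoop (edges : List (Int × Int)) : Nat → List Int → List Int → List Int
  | 0, _, result => result
  | fuel+1, travels_q, result =>
    if travels_q.length > 0 then
      pvALoop edges fuel
        (pvARemove (pvAForI edges result travels_q.length travels_q).2
          (pvAForI edges result travels_q.length travels_q).1 result).1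
        (pvARemove (pvAForI edges result travels_q.length travels_q).2
          (pvAForI edges result travels_q.length travels_q).1 result).2
    else result

def traversal_time_without_tree (edges : List (Int × Int)) (starting_town : Int) : List Int :=
  pvALoop edges (4 * edges.length + 8) [starting_town] []

-- ===== PORT B =====
-- adjacency dict: adj.setdefault(a, []).append(b) is Dict.modify a [] (· ++ [b])
def pvBAdj (edges : List (Int × Int)) : PySem.Dict Int (List Int) :=
  edges.foldl (fun d e => (d.modify e.1 [] (· ++ [e.2])).modify e.2 [] (· ++ [e.1])) PySem.Dict.empty

-- 'while level:' with the same fuel guard as A's port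
def pvBLoop (adj : PySem.Dict Int (List Int)) : Nat → List Int → List Int → PySem.Set Int → List Int
  | 0, _, result, _ => result
  | fuel+1, level, result, seen =>
    if level.isEmpty then result
    else
      pvBLoop adj fuel
        (level.flatMap (fun u => (adj.getD u []).filter (fun v => !(PySem.Set.contains seen v))))
        (result ++ level) (PySem.Set.update seen level)

def traversal_time_without_tree_alt (edges : List (Int × Int)) (starting_town : Int) : List Int :=
  pvBLoop (pvBAdj edges) (4 * edges.length + 8) [starting_town] [] PySem.Set.empty

-- ===== PRECONDITION & SPEC =====
def Spec_traversal_time_without_tree (edges : List (Int × Int)) (starting_town : Int) (out : List Int) : Prop := out = traversal_time_without_tree_alt edges starting_town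
instance (edges : List (Int × Int)) (starting_town : Int) (out : List Int) : Decidable (Spec_traversal_time_without_tree edges starting_town out) := by unfold Spec_traversal_time_without_tree; infer_instance

-- ===== CLAIM (what is proved, stated in full; the proofs are below) =====
def Claim_equal_traversal_time_without_tree : Prop := ∀ (edges : List (Int × Int)) (starting_town : Int), Dom_traversal_time_without_tree edges starting_town → Spec_traversal_time_without_tree edges starting_town (traversal_time_without_tree edges starting_town)

-- ===== LEMMAS AND PROOFS =====

-- the towns one edge contributes for town x, in A's check order, unfiltered
def pvContrib0 (x : Int) (e : Int × Int) : List Int :=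
  (if e.1 == x then [e.2] else []) ++ (if e.2 == x then [e.1] else [])

-- the same, filtered by 'not in result'
def pvContrib (result : List Int) (x : Int) (e : Int × Int) : List Int :=
  (if e.1 == x && !(result.contains e.2) then [e.2] else []) ++
  (if e.2 == x && !(result.contains e.1) then [e.1] else [])

theorem pvAEdgeLoop_eq (edges : List (Int × Int)) (result : List Int) (x : Int) (q : List Int) :
    pvAEdgeLoop edges result x q = q ++ edges.flatMap (pvContrib result x) := by
  induction edges generalizing q with
  | nil => simp [pvAEdgeLoop]
  | cons e tl ih =>
    simp only [pvAEdgeLoop, List.foldl_cons, List.flatMap_cons] at *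
    rw [ih]
    simp only [pvContrib]
    split_ifs <;> simp

theorem pvContrib_eq_filter (edges : List (Int × Int)) (result : List Int) (x : Int) :
    edges.flatMap (pvContrib result x)
      = (edges.flatMap (pvContrib0 x)).filter (fun v => !(result.contains v)) := by
  induction edges with
  | nil => simp
  | cons e tl ih =>
    simp only [List.flatMap_cons, List.filter_append, ih, pvContrib, pvContrib0]
    congr 1
    split_ifs with h1 h2 h2 <;>
      simp_all

-- the step of pvAForI, as the valid towns of one level : take n of the original queue
theorem pvAForI_eq (edges : List (Int × Int)) (result : List Int) (q0 : List Int)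
    (n : Nat) (hn : n ≤ q0.length) :
    pvAForI edges result n q0
      = (q0 ++ (q0.take n).flatMap (fun x => edges.flatMap (pvContrib result x)), q0.take n) := by
  unfold pvAForI
  rw [PySem.List.pyRange_zero_natCast]
  induction n with
  | zero => simp
  | succ m ih =>
    have hm : m ≤ q0.length := Nat.le_of_succ_le hn
    rw [List.range_succ, List.map_append, List.foldl_append]
    rw [ih hm]
    have hlt : m < q0.length := hn
    simp only [List.foldl_cons, List.foldl_nil, List.map_cons, List.map_nil]
    have hget : PySem.List.pyGetD (q0 ++ (q0.take m).flatMap fun x => edges.flatMap (pvContrib result x)) ((m : Nat) : Int) 0 = q0[m] := by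
      rw [PySem.List.pyGetD_natCast]
      rw [List.getD_eq_getElem?_getD, List.getElem?_append_left hlt]
      simp [hlt]
    rw [hget, pvAEdgeLoop_eq]
    rw [List.take_succ_eq_append_getElem hlt, List.flatMap_append]
    simp

theorem pvAForI_full (edges : List (Int × Int)) (result q0 : List Int) :
    pvAForI edges result q0.length q0
      = (q0 ++ q0.flatMap (fun x => edges.flatMap (pvContrib result x)), q0) := by
  rw [pvAForI_eq edges result q0 q0.length le_rfl, List.take_length]

theorem pvARemove_eq (pre : List Int) (extra result : List Int) :
    pvARemove pre (pre ++ extra) result = (extra, result ++ pre) := by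
  induction pre generalizing result with
  | nil => simp [pvARemove]
  | cons t tl ih =>
    simp only [pvARemove, List.foldl_cons, List.cons_append] at *
    rw [PySem.List.remove?_cons_self]
    simpa using ih (result ++ [t])

theorem pvBAdj_getD (edges : List (Int × Int)) (u : Int) :
    (pvBAdj edges).getD u [] = edges.flatMap (pvContrib0 u) := by
  unfold pvBAdj
  suffices h : ∀ d : PySem.Dict Int (List Int),
      (edges.foldl (fun d e => (d.modify e.1 [] (· ++ [e.2])).modify e.2 [] (· ++ [e.1])) d).getD u []
        = d.getD u [] ++ edges.flatMap (pvContrib0 u) by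
    simpa using h PySem.Dict.empty
  induction edges with
  | nil => simp
  | cons e tl ih =>
    intro d
    simp only [List.foldl_cons, List.flatMap_cons, ih]
    simp only [PySem.Dict.getD_modify, pvContrib0]
    split_ifs <;> simp_all [beq_iff_eq]

-- the two loops agree whenever seen and result hold the same towns
theorem pvLoop_eq (edges : List (Int × Int)) (fuel : Nat) :
    ∀ (level result : List Int) (seen : PySem.Set Int),
      (∀ v : Int, v ∈ seen ↔ v ∈ result) →
      pvALoop edges fuel level result = pvBLoop (pvBAdj edges) fuel level result seen := by
  induction fuel with
  | zero => intro level result seen _; rfl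
  | succ fuel ih =>
    intro level result seen hseen
    rw [pvALoop, pvBLoop]
    by_cases hl : level = []
    · subst hl; simp
    · have h1 : level.length > 0 := List.length_pos_iff.mpr hl
      have h2 : level.isEmpty = false := by simp [hl]
      rw [if_pos h1, if_neg (by simp [h2])]
      rw [pvAForI_full]
      dsimp only
      rw [pvARemove_eq]
      dsimp only
      have hfun : (fun x => edges.flatMap (pvContrib result x))
          = (fun u => ((pvBAdj edges).getD u []).filter (fun v => !(PySem.Set.contains seen v))) := by
        funext u
        rw [pvBAdj_getD, pvContrib_eq_filter]
        apply List.filter_congr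
        intro v _
        have hc : PySem.Set.contains seen v = result.contains v := by
          rw [PySem.Set.contains_eq_listContains, List.contains_eq_mem, List.contains_eq_mem]
          simp [hseen v]
        rw [hc]
      simp only [hfun]
      apply ih
      intro v
      simp only [PySem.Set.mem_update, List.mem_append, hseen]

-- ===== VERDICT (by name: the statement is the Claim_ definition above) =====
theorem traversal_time_without_tree_spec : Claim_equal_traversal_time_without_tree := by
  intro edges s _
  unfold Spec_traversal_time_without_tree traversal_time_without_tree traversal_time_without_tree_alt
  exact pvLoop_eq edges _ _ _ _ (fun _ => Iff.rfl)
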